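-- pv_equiv track=rewrite | github.com/1688168/Codes | LC/[2536] Increment Submatrics by One.py | rangeAddQueries
-- ===== SOURCE A (Python) =====
-- from typing import List
--
-- class diff2d:
--     def __init__(self, m, n):
--         # declare a 2d  to record all the queries
--         self.m=m
--         self.n=n
--         self.diff=[[0]*(n+1) for _ in range(m+1)]
--
--         # declare a 2d list for calculated output
--         self.out=[[0]*(n+1) for _ in range(m+1)]
--
--     # set method to record query
--     def set(self, x0, y0, x1, y1, val):
--         self.diff[x0][y0] += val   # we have extra row and extra col to avoid idx out of bound
--         self.diff[x0][y1+1] -= val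
--         self.diff[x1+1][y0] -= val
--         self.diff[x1+1][y1+1] += val
--
--
--     # calc method to compute from diff into out
--     def calc(self):
--         #self.out[0][0]=self.diff[0][0]
--         for ii in range(self.m):
--             for jj in range(self.n):
--                 a=0 if ii==0 else self.out[ii-1][jj]
--                 b=0 if jj==0 else self.out[ii][jj-1]
--                 c=0 if (ii==0 or jj==0) else self.out[ii-1][jj-1]
--                 d=self.diff[ii][jj]
--                 self.out[ii][jj]=a+b-c+d
--
-- def rangeAddQueries(n: int, queries: List[List[int]]) -> List[List[int]]:
--     my_2d=diff2d(n, n)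
--     for q in queries:
--         my_2d.set(q[0], q[1], q[2], q[3], 1)
--
--
--     my_2d.calc()
--     res=[[0]*n for _ in range(n)]
--     for ii in range(n):
--         for jj in range(n):
--             res[ii][jj]=my_2d.out[ii][jj]
--
--     return res
-- ===== SOURCE B (Python) =====
-- from typing import List
--
-- def rangeAddQueries(n: int, queries: List[List[int]]) -> List[List[int]]:
--     res = [[0] * n for _ in range(n)]
--     for q in queries:
--         for ii in range(q[0], q[2] + 1):
--             for jj in range(q[1], q[3] + 1):
--                 res[ii][jj] += 1
--     return res
-- ===== Notes on version B (the rewrite author's own statement) =====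
-- stated objective: simpler
-- what changed: Replaced the 2D difference-array + prefix-sum machinery (padded (n+1)x(n+1) tables, four corner deltas per query, inclusion-exclusion sweep, final copy) with a direct loop that increments every cell of each queried submatrix in a single n x n result.
-- outside the precondition, e.g. on rangeAddQueries(2, [[-1, -1, -1, -1]]): A returns [[1, 1], [1, 1]], B returns [[0, 0], [0, 1]]
import Mathlib
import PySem

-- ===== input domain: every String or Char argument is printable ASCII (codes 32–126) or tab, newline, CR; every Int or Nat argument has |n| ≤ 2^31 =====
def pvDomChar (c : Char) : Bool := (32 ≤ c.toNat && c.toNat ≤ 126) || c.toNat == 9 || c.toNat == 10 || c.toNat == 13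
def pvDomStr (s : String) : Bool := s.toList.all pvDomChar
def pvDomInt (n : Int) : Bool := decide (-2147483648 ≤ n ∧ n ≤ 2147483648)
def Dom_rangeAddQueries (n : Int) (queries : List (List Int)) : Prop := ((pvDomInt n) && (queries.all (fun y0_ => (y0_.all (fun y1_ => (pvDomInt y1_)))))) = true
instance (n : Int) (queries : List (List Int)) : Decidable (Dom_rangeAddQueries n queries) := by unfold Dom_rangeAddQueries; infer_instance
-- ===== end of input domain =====

-- B replaces A's 2D difference-array + prefix-sum machinery with direct per-query
-- submatrix increments (objective: simpler; not faster — B does more work per query).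


-- Shared matrix helpers (a Python list-of-lists of ints).
-- pvMget/pvMadd/pvMset model M[a][b], M[i][j] += v, M[i][j] = v; the getD/modify defaults are
-- never reached on inputs satisfying Pre_ (all indices there are nonnegative and in range),
-- where these helpers are exact.
def pvZeros (r c : Nat) : List (List Int) := List.replicate r (List.replicate c 0)
def pvMget (M : List (List Int)) (a b : Nat) : Int := (M.getD a []).getD b 0
def pvMadd (M : List (List Int)) (i j : Nat) (v : Int) : List (List Int) :=
  M.modify i (fun row => row.modify j (· + v))
def pvMset (M : List (List Int)) (i j : Nat) (v : Int) : List (List Int) :=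
  M.modify i (fun row => row.set j v)

-- ===== PORT A =====
-- diff2d.set(x0, y0, x1, y1, val): the four corner updates of the difference array.
def pvDiffSet (M : List (List Int)) (x0 y0 x1 y1 v : Int) : List (List Int) :=
  let M1 := pvMadd M x0.toNat y0.toNat v
  let M2 := pvMadd M1 x0.toNat (y1+1).toNat (-v)
  let M3 := pvMadd M2 (x1+1).toNat y0.toNat (-v)
  pvMadd M3 (x1+1).toNat (y1+1).toNat v

-- one iteration of the body of diff2d.calc
def pvCalcCell (diff out : List (List Int)) (ii jj : Nat) : List (List Int) :=
  let a := if ii = 0 then 0 else pvMget out (ii-1) jj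
  let b := if jj = 0 then 0 else pvMget out ii (jj-1)
  let c := if ii = 0 ∨ jj = 0 then 0 else pvMget out (ii-1) (jj-1)
  let d := pvMget diff ii jj
  pvMset out ii jj (a+b-c+d)

-- diff2d.calc: the nested 'for ii in range(m): for jj in range(n):' loops over self.out
def pvCalc (diff : List (List Int)) (m n : Nat) : List (List Int) :=
  (List.range m).foldl
    (fun out ii => (List.range n).foldl (fun out jj => pvCalcCell diff out ii jj) out)
    (pvZeros (m+1) (n+1))

def rangeAddQueries (n : Int) (queries : List (List Int)) : List (List Int) :=
  let N := n.toNat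
  let diff := queries.foldl
    (fun d q => pvDiffSet d (q.getD 0 0) (q.getD 1 0) (q.getD 2 0) (q.getD 3 0) 1)
    (pvZeros (N+1) (N+1))
  let out := pvCalc diff N N
  (List.range N).foldl
    (fun res ii => (List.range N).foldl (fun res jj => pvMset res ii jj (pvMget out ii jj)) res)
    (pvZeros N N)

-- ===== PORT B =====
-- for q in queries: for ii in range(q[0], q[2]+1): for jj in range(q[1], q[3]+1): res[ii][jj] += 1
def rangeAddQueries_alt (n : Int) (queries : List (List Int)) : List (List Int) :=
  queries.foldl
    (fun res q =>
      (PySem.List.pyRange (q.getD 0 0) (q.getD 2 0 + 1) 1).foldl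
        (fun res ii =>
          (PySem.List.pyRange (q.getD 1 0) (q.getD 3 0 + 1) 1).foldl
            (fun res jj => pvMadd res ii.toNat jj.toNat 1) res)
        res)
    (pvZeros n.toNat n.toNat)

-- ===== PRECONDITION & SPEC =====
-- Pre_ admits the problem's guaranteed input shape — 0 ≤ n and each query a list of
-- length ≥ 4 with 0 ≤ x0 ≤ x1 < n and 0 ≤ y0 ≤ y1 < n — and also any n with no queries
-- (both programs return the same zero matrix there). Outside it A raises IndexError
-- (too-short queries, coordinates ≥ n) or returns values produced by Python negative-index
-- wraparound or by an inverted rectangle fed through the difference array (negative entries) —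
-- accidental corner behaviour of A's implementation on inputs no caller is specified on.
def Pre_rangeAddQueries (n : Int) (queries : List (List Int)) : Prop :=
  queries = [] ∨ (0 ≤ n ∧ ∀ q ∈ queries, 4 ≤ q.length ∧
    0 ≤ q.getD 0 0 ∧ q.getD 0 0 ≤ q.getD 2 0 ∧ q.getD 2 0 < n ∧
    0 ≤ q.getD 1 0 ∧ q.getD 1 0 ≤ q.getD 3 0 ∧ q.getD 3 0 < n)
instance (n : Int) (queries : List (List Int)) : Decidable (Pre_rangeAddQueries n queries) := by
  unfold Pre_rangeAddQueries; infer_instance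

def pvWitness_rangeAddQueries : Int × List (List Int) := (2, [[0,0,1,1],[0,0,0,0]])

def Spec_rangeAddQueries (n : Int) (queries : List (List Int)) (out : List (List Int)) : Prop := out = rangeAddQueries_alt n queries
instance (n : Int) (queries : List (List Int)) (out : List (List Int)) : Decidable (Spec_rangeAddQueries n queries out) := by unfold Spec_rangeAddQueries; infer_instance

-- ===== CLAIM (what is proved, stated in full; the proofs are below) =====
def Claim_equal_rangeAddQueries : Prop := ∀ (n : Int) (queries : List (List Int)), Dom_rangeAddQueries n queries → Pre_rangeAddQueries n queries → Spec_rangeAddQueries n queries (rangeAddQueries n queries)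

-- ===== LEMMAS AND PROOFS =====

-- a query admitted by Pre_, with n already replaced by the Nat size N
def pvValid (N : Nat) (q : List Int) : Prop :=
  0 ≤ q.getD 0 0 ∧ q.getD 0 0 ≤ q.getD 2 0 ∧ q.getD 2 0 < (N:Int) ∧
  0 ≤ q.getD 1 0 ∧ q.getD 1 0 ≤ q.getD 3 0 ∧ q.getD 3 0 < (N:Int)

-- the four-corner delta a query writes into the difference array
def pvDelta (q : List Int) (a b : Nat) : Int :=
  (if (a:Int) = q.getD 0 0 ∧ (b:Int) = q.getD 1 0 then 1 else 0)
  - (if (a:Int) = q.getD 0 0 ∧ (b:Int) = q.getD 3 0 + 1 then 1 else 0)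
  - (if (a:Int) = q.getD 2 0 + 1 ∧ (b:Int) = q.getD 1 0 then 1 else 0)
  + (if (a:Int) = q.getD 2 0 + 1 ∧ (b:Int) = q.getD 3 0 + 1 then 1 else 0)

-- the indicator of a query's rectangle
def pvRect (q : List Int) (a b : Nat) : Int :=
  if q.getD 0 0 ≤ (a:Int) ∧ (a:Int) ≤ q.getD 2 0 ∧ q.getD 1 0 ≤ (b:Int) ∧ (b:Int) ≤ q.getD 3 0
  then 1 else 0

-- the 2D prefix-sum recurrence computed by diff2d.calc, as a function of the cell values it reads
def pvF (d : Nat → Nat → Int) : Nat → Nat → Int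
  | 0, 0 => d 0 0
  | i+1, 0 => pvF d i 0 + d (i+1) 0
  | 0, j+1 => pvF d 0 j + d 0 (j+1)
  | i+1, j+1 => pvF d i (j+1) + pvF d (i+1) j - pvF d i j + d (i+1) (j+1)

def pvShape (M : List (List Int)) (r c : Nat) : Prop :=
  M.length = r ∧ ∀ (a : Nat) (h : a < M.length), M[a].length = c

-- invariant of a row-major fill: rows < i are done, row i is done up to column j, the rest is 0
def pvInvFill (t : Nat → Nat → Int) (n i j : Nat) (M : List (List Int)) : Prop :=
  ∀ a b, pvMget M a b = if (a < i ∧ b < n) ∨ (a = i ∧ b < j) then t a b else 0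

-- ---- basic matrix lemmas ----
lemma pvShape_zeros (r c : Nat) : pvShape (pvZeros r c) r c := by
  constructor
  · simp [pvZeros]
  · intro a h
    simp [pvZeros] at h ⊢

lemma pvMget_zeros (r c a b : Nat) : pvMget (pvZeros r c) a b = 0 := by
  simp only [pvMget, pvZeros, List.getD_eq_getElem?_getD, List.getElem?_replicate]
  split <;> simp

lemma pvShape_madd (M : List (List Int)) (r c i j : Nat) (v : Int) (h : pvShape M r c) :
    pvShape (pvMadd M i j v) r c := by
  obtain ⟨hl, hr⟩ := h
  refine ⟨by simpa [pvMadd] using hl, ?_⟩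
  intro a ha
  simp only [pvMadd, List.length_modify] at ha ⊢
  rw [List.getElem_modify]
  split <;> simp [hr a ha]

lemma pvShape_mset (M : List (List Int)) (r c i j : Nat) (v : Int) (h : pvShape M r c) :
    pvShape (pvMset M i j v) r c := by
  obtain ⟨hl, hr⟩ := h
  refine ⟨by simpa [pvMset] using hl, ?_⟩
  intro a ha
  simp only [pvMset, List.length_modify] at ha ⊢
  rw [List.getElem_modify]
  split <;> simp [hr a ha]

lemma pvMget_eq (M : List (List Int)) (a b : Nat) (ha : a < M.length) :
    pvMget M a b = M[a].getD b 0 := by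
  simp [pvMget, List.getD_eq_getElem?_getD, List.getElem?_eq_getElem ha]

lemma pvRowAdd (row : List Int) (j b : Nat) (v : Int) (hj : j < row.length) :
    (row.modify j (· + v)).getD b 0 = row.getD b 0 + (if b = j then v else 0) := by
  rw [List.getD_eq_getElem?_getD, List.getD_eq_getElem?_getD, List.getElem?_modify]
  by_cases hjb : j = b
  · subst hjb
    simp [List.getElem?_eq_getElem hj]
  · simp [hjb, Ne.symm hjb]

lemma pvRowSet (row : List Int) (j b : Nat) (v : Int) (hj : j < row.length) :
    (row.set j v).getD b 0 = if b = j then v else row.getD b 0 := by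
  rw [List.getD_eq_getElem?_getD, List.getD_eq_getElem?_getD, List.getElem?_set]
  by_cases hjb : j = b
  · subst hjb; simp [hj]
  · simp [hjb, Ne.symm hjb]

lemma pvMget_madd (M : List (List Int)) (r c i j : Nat) (v : Int) (h : pvShape M r c)
    (hi : i < r) (hj : j < c) (a b : Nat) :
    pvMget (pvMadd M i j v) a b = pvMget M a b + (if a = i ∧ b = j then v else 0) := by
  obtain ⟨hl, hr⟩ := h
  by_cases ha : a < M.length
  · have ha' : a < (pvMadd M i j v).length := by simpa [pvMadd] using ha
    rw [pvMget_eq _ _ _ ha', pvMget_eq _ _ _ ha]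
    simp only [pvMadd, List.getElem_modify]
    by_cases hia : i = a
    · rw [if_pos hia]
      subst hia
      simpa using pvRowAdd M[i] j b v (by rw [hr i ha]; exact hj)
    · simp [hia, Ne.symm hia]
  · have hai : a ≠ i := by omega
    have h1 : (pvMadd M i j v)[a]? = none :=
      List.getElem?_eq_none (by simpa [pvMadd] using (by omega : M.length ≤ a))
    have h2 : M[a]? = none := List.getElem?_eq_none (by omega)
    simp only [pvMget, List.getD_eq_getElem?_getD, h1, h2]
    simp [hai]

lemma pvMget_mset (M : List (List Int)) (r c i j : Nat) (v : Int) (h : pvShape M r c)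
    (hi : i < r) (hj : j < c) (a b : Nat) :
    pvMget (pvMset M i j v) a b = if a = i ∧ b = j then v else pvMget M a b := by
  obtain ⟨hl, hr⟩ := h
  by_cases ha : a < M.length
  · have ha' : a < (pvMset M i j v).length := by simpa [pvMset] using ha
    rw [pvMget_eq _ _ _ ha', pvMget_eq _ _ _ ha]
    simp only [pvMset, List.getElem_modify]
    by_cases hia : i = a
    · rw [if_pos hia]
      subst hia
      rw [pvRowSet _ _ _ _ (by rw [hr i ha]; exact hj)]
      by_cases hb : b = j <;> simp [hb]
    · simp [hia, Ne.symm hia]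
  · have hai : a ≠ i := by omega
    have h1 : (pvMset M i j v)[a]? = none :=
      List.getElem?_eq_none (by simpa [pvMset] using (by omega : M.length ≤ a))
    have h2 : M[a]? = none := List.getElem?_eq_none (by omega)
    simp only [pvMget, List.getD_eq_getElem?_getD, h1, h2]
    simp [hai]

lemma pvMatEq (M1 M2 : List (List Int)) (N : Nat) (h1 : pvShape M1 N N) (h2 : pvShape M2 N N)
    (h : ∀ a b, a < N → b < N → pvMget M1 a b = pvMget M2 a b) : M1 = M2 := by
  obtain ⟨hl1, hr1⟩ := h1
  obtain ⟨hl2, hr2⟩ := h2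
  apply List.ext_getElem (by omega)
  intro a ha1 ha2
  apply List.ext_getElem (by rw [hr1 a ha1, hr2 a ha2])
  intro b hb1 hb2
  have hb : b < N := by rw [hr1 a ha1] at hb1; exact hb1
  have := h a b (by omega) hb
  rw [pvMget_eq _ _ _ ha1, pvMget_eq _ _ _ ha2] at this
  rw [List.getD_eq_getElem?_getD, List.getD_eq_getElem?_getD,
      List.getElem?_eq_getElem hb1, List.getElem?_eq_getElem hb2] at this
  simpa using this

-- ---- pvF lemmas ----
lemma pvF_eq (d : Nat → Nat → Int) (i j : Nat) :
    pvF d i j = (if i = 0 then 0 else pvF d (i-1) j) + (if j = 0 then 0 else pvF d i (j-1))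
      - (if i = 0 ∨ j = 0 then 0 else pvF d (i-1) (j-1)) + d i j := by
  rcases i with _ | i <;> rcases j with _ | j <;> simp [pvF]

lemma pvF_congr (d d' : Nat → Nat → Int) (h : ∀ a b, d a b = d' a b) (i j : Nat) :
    pvF d i j = pvF d' i j := by
  have : d = d' := funext fun a => funext fun b => h a b
  rw [this]

lemma pvF_zero (i j : Nat) : pvF (fun _ _ => 0) i j = 0 := by
  induction i, j using pvF.induct <;> simp_all [pvF]

lemma pvF_add (d1 d2 : Nat → Nat → Int) (i j : Nat) :
    pvF (fun a b => d1 a b + d2 a b) i j = pvF d1 i j + pvF d2 i j := by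
  induction i, j using pvF.induct <;> simp_all [pvF] <;> ring

lemma pvF_delta (N : Nat) (q : List Int) (hq : pvValid N q) (i j : Nat) :
    pvF (pvDelta q) i j = pvRect q i j := by
  obtain ⟨h1, h2, h3, h4, h5, h6⟩ := hq
  induction i, j using pvF.induct with
  | case1 => simp only [pvF, pvDelta, pvRect]; split_ifs <;> omega
  | case2 i ih => rw [pvF, ih]; simp only [pvDelta, pvRect]; split_ifs <;> push_cast <;> omega
  | case3 j ih => rw [pvF, ih]; simp only [pvDelta, pvRect]; split_ifs <;> push_cast <;> omega
  | case4 i j ih1 ih2 ih3 =>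
    rw [pvF, ih1, ih2, ih3]; simp only [pvDelta, pvRect]; split_ifs <;> push_cast <;> omega

lemma pvF_sum (N : Nat) (qs : List (List Int)) (hqs : ∀ q ∈ qs, pvValid N q) (i j : Nat) :
    pvF (fun a b => (qs.map (fun q => pvDelta q a b)).sum) i j
      = (qs.map (fun q => pvRect q i j)).sum := by
  induction qs with
  | nil => simpa using pvF_zero i j
  | cons q qs ih =>
    have hq := hqs q (List.mem_cons_self ..)
    have hqs' : ∀ p ∈ qs, pvValid N p := fun p hp => hqs p (List.mem_cons_of_mem _ hp)
    calc pvF (fun a b => ((q :: qs).map (fun p => pvDelta p a b)).sum) i j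
        = pvF (fun a b => pvDelta q a b + (qs.map (fun p => pvDelta p a b)).sum) i j := by
          apply pvF_congr; intro a b; simp
      _ = pvF (pvDelta q) i j + pvF (fun a b => (qs.map (fun p => pvDelta p a b)).sum) i j :=
          pvF_add _ _ i j
      _ = pvRect q i j + (qs.map (fun p => pvRect p i j)).sum := by
          rw [pvF_delta N q hq, ih hqs']
      _ = ((q :: qs).map (fun p => pvRect p i j)).sum := by simp

-- ---- difference-array characterisation (A's first loop) ----
lemma pvDiffSet_shape (N : Nat) (M : List (List Int)) (q : List Int)
    (h : pvShape M (N+1) (N+1)) :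
    pvShape (pvDiffSet M (q.getD 0 0) (q.getD 1 0) (q.getD 2 0) (q.getD 3 0) 1) (N+1) (N+1) := by
  unfold pvDiffSet
  exact pvShape_madd _ _ _ _ _ _ (pvShape_madd _ _ _ _ _ _ (pvShape_madd _ _ _ _ _ _
    (pvShape_madd _ _ _ _ _ _ h)))

lemma pvDiffSet_get (N : Nat) (M : List (List Int)) (q : List Int) (hq : pvValid N q)
    (h : pvShape M (N+1) (N+1)) (a b : Nat) :
    pvMget (pvDiffSet M (q.getD 0 0) (q.getD 1 0) (q.getD 2 0) (q.getD 3 0) 1) a b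
      = pvMget M a b + pvDelta q a b := by
  obtain ⟨h1, h2, h3, h4, h5, h6⟩ := hq
  have s1 := pvShape_madd M (N+1) (N+1) (q.getD 0 0).toNat (q.getD 1 0).toNat 1 h
  have s2 := pvShape_madd _ (N+1) (N+1) (q.getD 0 0).toNat (q.getD 3 0 + 1).toNat (-1) s1
  have s3 := pvShape_madd _ (N+1) (N+1) (q.getD 2 0 + 1).toNat (q.getD 1 0).toNat (-1) s2
  unfold pvDiffSet
  rw [pvMget_madd _ (N+1) (N+1) _ _ _ s3 (by omega) (by omega),
      pvMget_madd _ (N+1) (N+1) _ _ _ s2 (by omega) (by omega),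
      pvMget_madd _ (N+1) (N+1) _ _ _ s1 (by omega) (by omega),
      pvMget_madd _ (N+1) (N+1) _ _ _ h (by omega) (by omega)]
  unfold pvDelta
  have e0 : (a = (q.getD 0 0).toNat ∧ b = (q.getD 1 0).toNat) ↔ ((a:Int) = q.getD 0 0 ∧ (b:Int) = q.getD 1 0) := by omega
  have e1 : (a = (q.getD 0 0).toNat ∧ b = (q.getD 3 0 + 1).toNat) ↔ ((a:Int) = q.getD 0 0 ∧ (b:Int) = q.getD 3 0 + 1) := by omega
  have e2 : (a = (q.getD 2 0 + 1).toNat ∧ b = (q.getD 1 0).toNat) ↔ ((a:Int) = q.getD 2 0 + 1 ∧ (b:Int) = q.getD 1 0) := by omega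
  have e3 : (a = (q.getD 2 0 + 1).toNat ∧ b = (q.getD 3 0 + 1).toNat) ↔ ((a:Int) = q.getD 2 0 + 1 ∧ (b:Int) = q.getD 3 0 + 1) := by omega
  rw [if_congr e0 rfl rfl, if_congr e1 rfl rfl, if_congr e2 rfl rfl, if_congr e3 rfl rfl]
  split_ifs <;> ring

lemma pvDiff_fold (N : Nat) (qs : List (List Int)) (hqs : ∀ q ∈ qs, pvValid N q)
    (M : List (List Int)) (h : pvShape M (N+1) (N+1)) :
    pvShape (qs.foldl (fun d q => pvDiffSet d (q.getD 0 0) (q.getD 1 0) (q.getD 2 0) (q.getD 3 0) 1) M) (N+1) (N+1)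
    ∧ ∀ a b, pvMget (qs.foldl (fun d q => pvDiffSet d (q.getD 0 0) (q.getD 1 0) (q.getD 2 0) (q.getD 3 0) 1) M) a b
        = pvMget M a b + (qs.map (fun q => pvDelta q a b)).sum := by
  induction qs generalizing M with
  | nil => simpa using h
  | cons q qs ih =>
    have hq := hqs q (List.mem_cons_self ..)
    have hqs' : ∀ p ∈ qs, pvValid N p := fun p hp => hqs p (List.mem_cons_of_mem _ hp)
    have h' := pvDiffSet_shape N M q h
    obtain ⟨ihs, ihg⟩ := ih hqs' _ h'
    refine ⟨by simpa using ihs, ?_⟩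
    intro a b
    simp only [List.foldl_cons, List.map_cons, List.sum_cons]
    rw [ihg a b, pvDiffSet_get N M q hq h a b]
    ring

-- ---- generic row-major fill lemma (for diff2d.calc and for A's final copy loop) ----
lemma pvInv_row_step (t : Nat → Nat → Int) (n i : Nat) (M : List (List Int))
    (h : pvInvFill t n i n M) : pvInvFill t n (i+1) 0 M := by
  intro a b
  rw [h a b]
  exact if_congr (by omega) rfl rfl

lemma pvFill (t : Nat → Nat → Int) (r c m n : Nat) (s : List (List Int) → Nat → Nat → List (List Int))
    (hstep : ∀ M i j, i < m → j < n → pvShape M r c → pvInvFill t n i j M →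
      pvShape (s M i j) r c ∧ pvInvFill t n i (j+1) (s M i j))
    (M0 : List (List Int)) (h0 : pvShape M0 r c) (hI0 : pvInvFill t n 0 0 M0) :
    pvShape ((List.range m).foldl (fun M ii => (List.range n).foldl (fun M jj => s M ii jj) M) M0) r c
    ∧ pvInvFill t n m 0 ((List.range m).foldl (fun M ii => (List.range n).foldl (fun M jj => s M ii jj) M) M0) := by
  have inner : ∀ (i : Nat), i < m → ∀ (j : Nat), j ≤ n → ∀ M, pvShape M r c → pvInvFill t n i 0 M →
      pvShape ((List.range j).foldl (fun M jj => s M i jj) M) r c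
      ∧ pvInvFill t n i j ((List.range j).foldl (fun M jj => s M i jj) M) := by
    intro i hi j
    induction j with
    | zero => intro _ M hs hI; exact ⟨hs, hI⟩
    | succ j ih =>
      intro hj M hs hI
      obtain ⟨hs', hI'⟩ := ih (by omega) M hs hI
      rw [List.range_succ, List.foldl_append]
      exact hstep _ i j hi (by omega) hs' hI'
  have outer : ∀ (i : Nat), i ≤ m →
      pvShape ((List.range i).foldl (fun M ii => (List.range n).foldl (fun M jj => s M ii jj) M) M0) r c
      ∧ pvInvFill t n i 0 ((List.range i).foldl (fun M ii => (List.range n).foldl (fun M jj => s M ii jj) M) M0) := by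
    intro i
    induction i with
    | zero => intro _; exact ⟨h0, hI0⟩
    | succ i ih =>
      intro hi
      obtain ⟨hs', hI'⟩ := ih (by omega)
      rw [List.range_succ, List.foldl_append]
      obtain ⟨hs'', hI''⟩ := inner i (by omega) n le_rfl _ hs' hI'
      exact ⟨hs'', pvInv_row_step t n i _ hI''⟩
  exact outer m le_rfl

-- ---- A's calc and copy loops characterised ----
lemma pvCalcCell_step (diff : List (List Int)) (N : Nat) (M : List (List Int)) (i j : Nat)
    (hi : i < N) (hj : j < N) (hM : pvShape M (N+1) (N+1))
    (hI : pvInvFill (pvF (pvMget diff)) N i j M) :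
    pvShape (pvCalcCell diff M i j) (N+1) (N+1)
    ∧ pvInvFill (pvF (pvMget diff)) N i (j+1) (pvCalcCell diff M i j) := by
  have hval : (if i = 0 then 0 else pvMget M (i-1) j) + (if j = 0 then 0 else pvMget M i (j-1))
      - (if i = 0 ∨ j = 0 then 0 else pvMget M (i-1) (j-1)) + pvMget diff i j
      = pvF (pvMget diff) i j := by
    have ha : (if i = 0 then 0 else pvMget M (i-1) j)
        = (if i = 0 then 0 else pvF (pvMget diff) (i-1) j) := by
      split
      · rfl
      · next h0 => rw [hI (i-1) j, if_pos (Or.inl ⟨by omega, hj⟩)]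
    have hb : (if j = 0 then 0 else pvMget M i (j-1))
        = (if j = 0 then 0 else pvF (pvMget diff) i (j-1)) := by
      split
      · rfl
      · next h0 => rw [hI i (j-1), if_pos (Or.inr ⟨rfl, by omega⟩)]
    have hc : (if i = 0 ∨ j = 0 then 0 else pvMget M (i-1) (j-1))
        = (if i = 0 ∨ j = 0 then 0 else pvF (pvMget diff) (i-1) (j-1)) := by
      split
      · rfl
      · next h0 => rw [hI (i-1) (j-1), if_pos (Or.inl ⟨by omega, by omega⟩)]
    rw [ha, hb, hc, ← pvF_eq]
  constructor
  · simp only [pvCalcCell]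
    exact pvShape_mset _ _ _ _ _ _ hM
  · intro a b
    simp only [pvCalcCell]
    rw [pvMget_mset M (N+1) (N+1) i j _ hM (by omega) (by omega) a b]
    by_cases hab : a = i ∧ b = j
    · have hcond : (a < i ∧ b < N) ∨ (a = i ∧ b < j+1) := Or.inr ⟨hab.1, by omega⟩
      rw [if_pos hab, if_pos hcond, hab.1, hab.2]
      exact hval
    · rw [if_neg hab, hI a b]
      split_ifs <;> first | rfl | omega

lemma pvCalc_char (diff : List (List Int)) (N : Nat) :
    pvShape (pvCalc diff N N) (N+1) (N+1)
    ∧ pvInvFill (pvF (pvMget diff)) N N 0 (pvCalc diff N N) := by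
  unfold pvCalc
  exact pvFill (pvF (pvMget diff)) (N+1) (N+1) N N (fun M i j => pvCalcCell diff M i j)
    (fun M i j hi hj hM hI => pvCalcCell_step diff N M i j hi hj hM hI)
    (pvZeros (N+1) (N+1)) (pvShape_zeros _ _)
    (fun a b => by rw [pvMget_zeros, if_neg (by omega)])

lemma pvCopy_char (out : List (List Int)) (N : Nat) :
    pvShape ((List.range N).foldl
      (fun res ii => (List.range N).foldl (fun res jj => pvMset res ii jj (pvMget out ii jj)) res)
      (pvZeros N N)) N N
    ∧ pvInvFill (fun a b => pvMget out a b) N N 0 ((List.range N).foldl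
      (fun res ii => (List.range N).foldl (fun res jj => pvMset res ii jj (pvMget out ii jj)) res)
      (pvZeros N N)) := by
  refine pvFill (fun a b => pvMget out a b) N N N N
    (fun M i j => pvMset M i j (pvMget out i j)) ?_ (pvZeros N N) (pvShape_zeros _ _)
    (fun a b => by rw [pvMget_zeros, if_neg (by omega)])
  intro M i j hi hj hM hI
  refine ⟨pvShape_mset _ _ _ _ _ _ hM, fun a b => ?_⟩
  rw [pvMget_mset M N N i j _ hM hi hj a b]
  by_cases hab : a = i ∧ b = j
  · have hcond : (a < i ∧ b < N) ∨ (a = i ∧ b < j+1) := Or.inr ⟨hab.1, by omega⟩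
    rw [if_pos hab, if_pos hcond, hab.1, hab.2]
  · rw [if_neg hab, hI a b]
    split_ifs <;> first | rfl | omega

-- ---- B characterised ----
lemma pvB_inner (N ii : Nat) (hii : ii < N) (y1 : Int) (hy1 : y1 < (N:Int)) :
    ∀ (k : Nat) (y0 : Int), 0 ≤ y0 → k = (y1 + 1 - y0).toNat →
    ∀ M, pvShape M N N →
      pvShape ((PySem.List.pyRange y0 (y1+1) 1).foldl (fun res jj => pvMadd res ii jj.toNat 1) M) N N
      ∧ ∀ a b, pvMget ((PySem.List.pyRange y0 (y1+1) 1).foldl (fun res jj => pvMadd res ii jj.toNat 1) M) a b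
          = pvMget M a b + (if a = ii ∧ y0 ≤ (b:Int) ∧ (b:Int) ≤ y1 then 1 else 0) := by
  intro k
  induction k with
  | zero =>
    intro y0 hy0 hk M hM
    rw [PySem.List.pyRange_one_eq_nil (by omega)]
    refine ⟨hM, fun a b => ?_⟩
    rw [if_neg (by omega)]
    simp
  | succ k ih =>
    intro y0 hy0 hk M hM
    rw [PySem.List.pyRange_one_cons (by omega)]
    simp only [List.foldl_cons]
    have hM' := pvShape_madd M N N ii y0.toNat 1 hM
    obtain ⟨ihs, ihg⟩ := ih (y0+1) (by omega) (by omega) _ hM'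
    refine ⟨ihs, fun a b => ?_⟩
    rw [ihg a b, pvMget_madd M N N ii y0.toNat 1 hM hii (by omega) a b]
    have : (a = ii ∧ b = y0.toNat) ↔ (a = ii ∧ (b:Int) = y0) := by omega
    rw [if_congr this rfl rfl]
    split_ifs <;> omega

lemma pvB_outer (N : Nat) (q : List Int) (hq : pvValid N q) :
    ∀ (k : Nat) (x0 : Int), 0 ≤ x0 → k = (q.getD 2 0 + 1 - x0).toNat →
    ∀ M, pvShape M N N →
      pvShape ((PySem.List.pyRange x0 (q.getD 2 0 + 1) 1).foldl
        (fun res ii => (PySem.List.pyRange (q.getD 1 0) (q.getD 3 0 + 1) 1).foldl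
          (fun res jj => pvMadd res ii.toNat jj.toNat 1) res) M) N N
      ∧ ∀ a b, pvMget ((PySem.List.pyRange x0 (q.getD 2 0 + 1) 1).foldl
          (fun res ii => (PySem.List.pyRange (q.getD 1 0) (q.getD 3 0 + 1) 1).foldl
            (fun res jj => pvMadd res ii.toNat jj.toNat 1) res) M) a b
          = pvMget M a b + (if x0 ≤ (a:Int) ∧ (a:Int) ≤ q.getD 2 0 ∧ q.getD 1 0 ≤ (b:Int) ∧ (b:Int) ≤ q.getD 3 0 then 1 else 0) := by
  obtain ⟨h1, h2, h3, h4, h5, h6⟩ := hq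
  intro k
  induction k with
  | zero =>
    intro x0 hx0 hk M hM
    rw [PySem.List.pyRange_one_eq_nil (a := x0) (b := q.getD 2 0 + 1) (by omega)]
    refine ⟨hM, fun a b => ?_⟩
    rw [if_neg (by omega)]
    simp
  | succ k ih =>
    intro x0 hx0 hk M hM
    rw [PySem.List.pyRange_one_cons (a := x0) (b := q.getD 2 0 + 1) (by omega)]
    simp only [List.foldl_cons]
    obtain ⟨hs1, hg1⟩ := pvB_inner N x0.toNat (by omega) (q.getD 3 0) h6
      (q.getD 3 0 + 1 - q.getD 1 0).toNat (q.getD 1 0) h4 rfl M hM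
    obtain ⟨ihs, ihg⟩ := ih (x0+1) (by omega) (by omega) _ hs1
    refine ⟨ihs, fun a b => ?_⟩
    rw [ihg a b, hg1 a b]
    have : (a = x0.toNat ∧ q.getD 1 0 ≤ (b:Int) ∧ (b:Int) ≤ q.getD 3 0)
         ↔ ((a:Int) = x0 ∧ q.getD 1 0 ≤ (b:Int) ∧ (b:Int) ≤ q.getD 3 0) := by omega
    rw [if_congr this rfl rfl]
    split_ifs <;> omega

lemma pvB_fold (N : Nat) (qs : List (List Int)) (hqs : ∀ q ∈ qs, pvValid N q)
    (M : List (List Int)) (h : pvShape M N N) :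
    pvShape (qs.foldl (fun res q =>
      (PySem.List.pyRange (q.getD 0 0) (q.getD 2 0 + 1) 1).foldl
        (fun res ii => (PySem.List.pyRange (q.getD 1 0) (q.getD 3 0 + 1) 1).foldl
          (fun res jj => pvMadd res ii.toNat jj.toNat 1) res) res) M) N N
    ∧ ∀ a b, pvMget (qs.foldl (fun res q =>
        (PySem.List.pyRange (q.getD 0 0) (q.getD 2 0 + 1) 1).foldl
          (fun res ii => (PySem.List.pyRange (q.getD 1 0) (q.getD 3 0 + 1) 1).foldl
            (fun res jj => pvMadd res ii.toNat jj.toNat 1) res) res) M) a b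
        = pvMget M a b + (qs.map (fun q => pvRect q a b)).sum := by
  induction qs generalizing M with
  | nil => simpa using h
  | cons q qs ih =>
    have hq := hqs q (List.mem_cons_self ..)
    have hqs' : ∀ p ∈ qs, pvValid N p := fun p hp => hqs p (List.mem_cons_of_mem _ hp)
    obtain ⟨hs1, hg1⟩ := pvB_outer N q hq (q.getD 2 0 + 1 - q.getD 0 0).toNat (q.getD 0 0)
      hq.1 rfl M h
    obtain ⟨ihs, ihg⟩ := ih hqs' _ hs1
    refine ⟨ihs, fun a b => ?_⟩
    simp only [List.foldl_cons, List.map_cons, List.sum_cons]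
    rw [ihg a b, hg1 a b]
    unfold pvRect
    ring

-- ===== VERDICT (by name: the statement is the Claim_ definition above) =====
theorem rangeAddQueries_spec : Claim_equal_rangeAddQueries := by
  intro n queries hdom hpre
  unfold Spec_rangeAddQueries
  have hvalid : ∀ q ∈ queries, pvValid n.toNat q := by
    rcases hpre with h | ⟨hn, hq⟩
    · subst h; intro q hqm; cases hqm
    · intro q hqm
      obtain ⟨_, h0, h1, h2, h3, h4, h5⟩ := hq q hqm
      exact ⟨h0, h1, by omega, h3, h4, by omega⟩
  show rangeAddQueries n queries = rangeAddQueries_alt n queries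
  simp only [rangeAddQueries, rangeAddQueries_alt]
  obtain ⟨hds, hdg⟩ := pvDiff_fold n.toNat queries hvalid (pvZeros (n.toNat+1) (n.toNat+1))
    (pvShape_zeros _ _)
  obtain ⟨hcs, hcI⟩ := pvCalc_char (queries.foldl
    (fun d q => pvDiffSet d (q.getD 0 0) (q.getD 1 0) (q.getD 2 0) (q.getD 3 0) 1)
    (pvZeros (n.toNat+1) (n.toNat+1))) n.toNat
  obtain ⟨hrs, hrI⟩ := pvCopy_char (pvCalc (queries.foldl
    (fun d q => pvDiffSet d (q.getD 0 0) (q.getD 1 0) (q.getD 2 0) (q.getD 3 0) 1)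
    (pvZeros (n.toNat+1) (n.toNat+1))) n.toNat n.toNat) n.toNat
  obtain ⟨hbs, hbg⟩ := pvB_fold n.toNat queries hvalid (pvZeros n.toNat n.toNat)
    (pvShape_zeros _ _)
  apply pvMatEq _ _ n.toNat hrs hbs
  intro a b ha hb
  have hab1 : (a < n.toNat ∧ b < n.toNat) ∨ (a = n.toNat ∧ b < 0) := Or.inl ⟨ha, hb⟩
  rw [hrI a b, hbg a b, pvMget_zeros, if_pos hab1]
  simp only []
  rw [hcI a b, if_pos hab1]
  have hd : ∀ x y, pvMget (queries.foldl
      (fun d q => pvDiffSet d (q.getD 0 0) (q.getD 1 0) (q.getD 2 0) (q.getD 3 0) 1)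
      (pvZeros (n.toNat+1) (n.toNat+1))) x y = (queries.map (fun q => pvDelta q x y)).sum := by
    intro x y
    rw [hdg x y, pvMget_zeros, zero_add]
  rw [pvF_congr _ _ hd a b, pvF_sum n.toNat queries hvalid a b, zero_add]
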